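-- pv_equiv track=rewrite | github.com/minhquana1906/Algorithm | TTUD_HK5/ThucHanh/TH1/bai1.py | find_mode2
-- ===== SOURCE A (Python) =====
-- def find_mode2(counter_arr):
--     output = 0
--     max_freq = 0
--     for num, freq in enumerate(counter_arr):
--         if freq > max_freq:
--             max_freq = freq
--             output = num
--
--     return output, max_freq
-- ===== SOURCE B (Python) =====
-- def find_mode2(counter_arr):
--     max_freq = max(counter_arr, default=0)
--     if max_freq <= 0:
--         return 0, 0
--     return counter_arr.index(max_freq), max_freq
-- ===== Notes on version B (the rewrite author's own statement) =====
-- stated objective: idiomatic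
-- what changed: Replaces A's single fused index-tracking loop by two library reductions: max(...) to find the highest count, then .index(...) to find its first position (first occurrence matches A's strict-greater rule).
import Mathlib
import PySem

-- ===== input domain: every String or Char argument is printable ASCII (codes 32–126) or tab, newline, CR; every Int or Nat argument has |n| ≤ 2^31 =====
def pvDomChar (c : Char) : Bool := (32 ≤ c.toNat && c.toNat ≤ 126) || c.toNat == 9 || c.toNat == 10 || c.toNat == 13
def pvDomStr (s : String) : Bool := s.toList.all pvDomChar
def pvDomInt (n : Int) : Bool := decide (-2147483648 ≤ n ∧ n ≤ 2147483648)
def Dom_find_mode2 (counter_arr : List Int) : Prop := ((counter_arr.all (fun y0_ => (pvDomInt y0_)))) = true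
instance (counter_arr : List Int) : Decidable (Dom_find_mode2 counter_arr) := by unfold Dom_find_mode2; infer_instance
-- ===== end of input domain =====

-- B replaces A's fused index-tracking loop by two library reductions (max, then first index); objective: idiomatic, same cost.


-- ===== PORT A =====
-- for num, freq in enumerate(counter_arr): if freq > max_freq: update both
def find_mode2 (counter_arr : List Int) : Int × Int :=
  (PySem.List.enumerate counter_arr 0).foldl
    (fun (st : Int × Int) (p : Int × Int) =>
      if p.2 > st.2 then (p.1, p.2) else st) (0, 0)

-- ===== PORT B =====
-- max_freq = max(counter_arr, default=0); if max_freq <= 0: (0,0); else (counter_arr.index(max_freq), max_freq)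
def find_mode2_alt (counter_arr : List Int) : Int × Int :=
  let max_freq := (PySem.List.max? counter_arr (fun y => y)).getD 0
  if max_freq ≤ 0 then (0, 0)
  else (((PySem.List.index? counter_arr max_freq).getD 0 : Nat), max_freq)
  -- .index never raises here since max_freq ∈ counter_arr; .getD 0 is the unreachable none-arm

-- ===== PRECONDITION & SPEC =====
def Spec_find_mode2 (counter_arr : List Int) (out : Int × Int) : Prop := out = find_mode2_alt counter_arr
instance (counter_arr : List Int) (out : Int × Int) : Decidable (Spec_find_mode2 counter_arr out) := by unfold Spec_find_mode2; infer_instance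

-- ===== CLAIM (what is proved, stated in full; the proofs are below) =====
def Claim_equal_find_mode2 : Prop := ∀ (counter_arr : List Int), Dom_find_mode2 counter_arr → Spec_find_mode2 counter_arr (find_mode2 counter_arr)

-- ===== LEMMAS AND PROOFS =====

theorem foldl_max_comm (l : List Int) (a b : Int) :
    List.foldl max (max a b) l = max a (List.foldl max b l) := by
  induction l generalizing b with
  | nil => simp
  | cons h t ih => simpa [max_assoc] using ih (max b h)

theorem le_foldl_max0 (l : List Int) : 0 ≤ List.foldl max 0 l := by
  induction l with
  | nil => simp
  | cons h t ih =>
    have : List.foldl max (max 0 h) t = max 0 (List.foldl max h t) := foldl_max_comm t 0 h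
    simp only [List.foldl_cons, this]
    exact le_max_left _ _

theorem mem_le_foldl_max0 (l : List Int) : ∀ y ∈ l, y ≤ List.foldl max 0 l := by
  induction l with
  | nil => simp
  | cons h t ih =>
    intro y hy
    have hc : List.foldl max 0 (h :: t) = max h (List.foldl max 0 t) := by
      simpa [max_comm] using foldl_max_comm t h 0
    rcases List.mem_cons.mp hy with rfl | hy
    · rw [hc]; exact le_max_left _ _
    · rw [hc]; exact le_trans (ih y hy) (le_max_right _ _)

theorem foldl_max0_mem (l : List Int) (h : 0 < List.foldl max 0 l) :
    List.foldl max 0 l ∈ l := by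
  induction l with
  | nil => simp at h
  | cons x t ih =>
    have hc : List.foldl max 0 (x :: t) = max x (List.foldl max 0 t) := by
      simpa [max_comm] using foldl_max_comm t x 0
    rcases le_total (List.foldl max 0 t) x with hx | hx
    · rw [hc, max_eq_left hx]; exact List.mem_cons_self
    · rw [hc, max_eq_right hx] at h ⊢
      exact List.mem_cons_of_mem _ (ih h)

-- characterization of A's fused loop
theorem charA (l : List Int) :
    find_mode2 l =
      (if List.foldl max 0 l ≤ 0 then (0, 0)
       else ((((PySem.List.index? l (List.foldl max 0 l)).getD 0 : Nat) : Int),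
             List.foldl max 0 l)) := by
  induction l using List.reverseRecOn with
  | nil => simp [find_mode2, PySem.List.enumerate]
  | append_singleton l x ih =>
    have hfold : List.foldl max 0 (l ++ [x]) = max (List.foldl max 0 l) x := by
      simp
    have henum : PySem.List.enumerate (l ++ [x]) 0
        = PySem.List.enumerate l 0 ++ [((l.length : Int), x)] := by
      rw [PySem.List.enumerate_append]
      simp [PySem.List.enumerate]
    have hstep : find_mode2 (l ++ [x])
        = (fun (st : Int × Int) (p : Int × Int) =>
            if p.2 > st.2 then (p.1, p.2) else st) (find_mode2 l) ((l.length : Int), x) := by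
      simp [find_mode2, henum]
    set m := List.foldl max 0 l with hm
    have hm0 : 0 ≤ m := le_foldl_max0 l
    by_cases hx : x > m
    · -- new maximum: x positive (x > m ≥ 0), not in l
      have hxpos : 0 < x := lt_of_le_of_lt hm0 hx
      have hxnot : x ∉ l := fun hmem => absurd (mem_le_foldl_max0 l x hmem) (not_le.mpr hx)
      have : max m x = x := max_eq_right (le_of_lt hx)
      rw [hstep, ih, hfold, this]
      have hidx : PySem.List.index? (l ++ [x]) x = some l.length :=
        PySem.List.index?_append_singleton_self l x hxnot
      split_ifs with h1 h2 <;> simp_all <;> omega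
    · -- old maximum wins
      push_neg at hx
      have hmax : max m x = m := max_eq_left hx
      rw [hstep, ih, hfold, hmax]
      by_cases hm1 : m ≤ 0
      · -- state stays (0,0); x ≤ m ≤ 0 so no update
        simp [hm1, not_lt.mpr (le_trans hx hm1)]
      · push_neg at hm1
        have hmem : m ∈ l := foldl_max0_mem l hm1
        have hidx : PySem.List.index? (l ++ [x]) m = PySem.List.index? l m :=
          PySem.List.index?_append_of_mem [x] hmem
        have hnle : ¬ m ≤ 0 := not_le.mpr hm1
        rw [if_neg hnle, if_neg hnle, hidx]
        simp [not_lt.mpr hx]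

-- B's max(default=0) agrees with A's running max whenever it is positive
theorem charB (l : List Int) :
    find_mode2_alt l =
      (if List.foldl max 0 l ≤ 0 then (0, 0)
       else ((((PySem.List.index? l (List.foldl max 0 l)).getD 0 : Nat) : Int),
             List.foldl max 0 l)) := by
  cases l with
  | nil => simp [find_mode2_alt, PySem.List.max?]
  | cons x t =>
    have hmx : PySem.List.max? (x :: t) (fun y => y) = some (t.foldl max x) :=
      PySem.List.max?_id_cons x t
    have hfold : List.foldl max 0 (x :: t) = max 0 (List.foldl max x t) := by
      simpa using foldl_max_comm t 0 x
    unfold find_mode2_alt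
    rw [hmx]
    have hfold' : List.foldl max 0 (x :: t) = max 0 (List.foldl max x t) := by
      simpa using hfold
    simp only [Option.getD_some, hfold']
    by_cases h : List.foldl max x t ≤ 0
    · rw [max_eq_left h]
      simp [h]
    · rw [max_eq_right ((not_le.mp h).le)]

-- ===== VERDICT (by name: the statement is the Claim_ definition above) =====
theorem find_mode2_spec : Claim_equal_find_mode2 := by
  intro l _
  unfold Spec_find_mode2
  rw [charA, charB]
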